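-- pv_equiv track=rewrite | github.com/Workflomics/clindaws | snakeAPE/translator.py | _group_port_values_by_dimension
-- ===== SOURCE A (Python) =====
-- from collections import defaultdict, deque
--
-- def _group_port_values_by_dimension(
--     port_values: tuple[tuple[str, str], ...],
-- ) -> dict[str, tuple[str, ...]]:
--     grouped: dict[str, list[str]] = defaultdict(list)
--     for dim, value in port_values:
--         grouped[dim].append(value)
--     return {
--         dim: tuple(values)
--         for dim, values in grouped.items()
--     }
-- ===== SOURCE B (Python) =====
-- def _group_port_values_by_dimension(port_values):
--     dims = dict.fromkeys(dim for dim, _ in port_values)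
--     return {dim: tuple(v for d, v in port_values if d == dim) for dim in dims}
-- ===== Notes on version B (the rewrite author's own statement) =====
-- stated objective: idiomatic
-- what changed: B replaces the defaultdict accumulation loop by dedup-of-keys (dict.fromkeys) followed by one filtering scan per distinct key, collecting each group directly in a dict comprehension.
import Mathlib
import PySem

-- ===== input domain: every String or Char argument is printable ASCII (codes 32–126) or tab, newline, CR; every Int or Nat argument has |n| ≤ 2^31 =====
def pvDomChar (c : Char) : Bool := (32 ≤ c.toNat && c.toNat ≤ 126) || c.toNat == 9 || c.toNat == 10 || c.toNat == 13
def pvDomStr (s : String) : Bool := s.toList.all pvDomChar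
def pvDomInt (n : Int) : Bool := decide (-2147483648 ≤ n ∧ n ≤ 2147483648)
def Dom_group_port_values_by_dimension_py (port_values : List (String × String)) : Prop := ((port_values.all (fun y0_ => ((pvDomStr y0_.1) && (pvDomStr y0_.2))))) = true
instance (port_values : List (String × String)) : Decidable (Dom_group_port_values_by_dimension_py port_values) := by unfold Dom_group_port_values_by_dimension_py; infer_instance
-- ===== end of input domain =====

-- ===== PORT A =====
-- grouped = defaultdict(list); for dim, value in port_values: grouped[dim].append(value)
-- then {dim: tuple(values) for dim, values in grouped.items()} (identity on each item's value list)
def group_port_values_by_dimension_py (port_values : List (String × String)) : List (String × List String) :=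
  let grouped : PySem.Dict String (List String) :=
    port_values.foldl (fun d p => d.modify p.1 [] (· ++ [p.2])) PySem.Dict.empty
  grouped.items.map (fun p => (p.1, p.2))

-- ===== PORT B =====
-- dims = dict.fromkeys(dim for dim, _ in port_values)  -- distinct keys, first-occurrence order
-- {dim: tuple(v for d, v in port_values if d == dim) for dim in dims}
def group_port_values_by_dimension_py_alt (port_values : List (String × String)) : List (String × List String) :=
  let dims : List String := PySem.Set.ofList (port_values.map Prod.fst)
  dims.map (fun k => (k, (port_values.filter (fun p => p.1 == k)).map Prod.snd))

-- ===== PRECONDITION & SPEC =====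
def Spec_group_port_values_by_dimension_py (port_values : List (String × String)) (out : List (String × List String)) : Prop := out = group_port_values_by_dimension_py_alt port_values
instance (port_values : List (String × String)) (out : List (String × List String)) : Decidable (Spec_group_port_values_by_dimension_py port_values out) := by unfold Spec_group_port_values_by_dimension_py; infer_instance

-- ===== CLAIM (what is proved, stated in full; the proofs are below) =====
def Claim_equal_group_port_values_by_dimension_py : Prop := ∀ (port_values : List (String × String)), Dom_group_port_values_by_dimension_py port_values → Spec_group_port_values_by_dimension_py port_values (group_port_values_by_dimension_py port_values)

-- ===== LEMMAS AND PROOFS =====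

-- ===== VERDICT (by name: the statement is the Claim_ definition above) =====
theorem group_port_values_by_dimension_py_spec : Claim_equal_group_port_values_by_dimension_py := by
  intro pvs _
  unfold Spec_group_port_values_by_dimension_py
  simp only [group_port_values_by_dimension_py, group_port_values_by_dimension_py_alt]
  have hnd : (pvs.foldl (fun d p => d.modify p.1 [] (· ++ [p.2])) PySem.Dict.empty).keys.Nodup :=
    PySem.Dict.nodup_keys_foldl_modify_key pvs Prod.fst [] (fun _ p => (· ++ [p.2]))
      PySem.Dict.empty (by simp [PySem.Dict.keys_empty])
  rw [PySem.Dict.items_eq_map_keys _ hnd []]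
  rw [PySem.Dict.keys_foldl_modify_key]
  simp only [PySem.Dict.keys_empty, PySem.Set.update_nil_left, List.map_map]
  refine List.map_congr_left (fun k _ => ?_)
  simp [PySem.Dict.getD_foldl_modify_append, PySem.Dict.getD_empty]
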